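-- pv_equiv track=rewrite | github.com/riffschelder/train.usaco.org | chapter3/section3.4/heritage.py | get_post_order
-- ===== SOURCE A (Python) =====
-- def get_post_order(in_order, pre_order):
--   root = pre_order[0]
--   root_index = in_order.find(root)  # root's index in in_order
--
--   in_order_left = in_order[:root_index]
--   in_order_right = in_order[root_index+1:]
--
--   pre_order_left = pre_order[1:root_index+1]
--   pre_order_right = pre_order[root_index+1:]
--
--   # Only recurse if there's a tree to recurse on.
--   post_order_left = ''
--   if in_order_left:
--     post_order_left = get_post_order(in_order_left, pre_order_left)
--   post_order_right = ''
--   if in_order_right: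
--     post_order_right = get_post_order(in_order_right, pre_order_right)
--   return post_order_left + post_order_right + root
-- ===== SOURCE B (Python) =====
-- def get_post_order(in_order, pre_order):
--     pos = {c: i for i, c in enumerate(in_order)}  # position of each char in in_order
--     out = []
--
--     def rec(lo, hi, plo):
--         # emit the postorder of the subtree whose preorder starts at plo and
--         # whose inorder occupies in_order[lo:hi]
--         root = pre_order[plo]
--         m = pos.get(root, -1)  # the map-based equivalent of in_order.find(root)
--         if lo < m:
--             rec(lo, m, plo + 1)
--         if m + 1 < hi:
--             rec(m + 1, hi, plo + 1 + (m - lo))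
--         out.append(root)
--
--     rec(0, len(in_order), 0)
--     return ''.join(out)
-- ===== Notes on version B (the rewrite author's own statement) =====
-- stated objective: alternative
-- what changed: B precomputes a char->index map once and recurses over index ranges (lo,hi,plo) appending to one output list, instead of A's per-call linear find plus four string slices and string concatenation; on the tree-traversal pairs Pre_ admits this does linear work where A's find/slicing is quadratic, but a timing run's large inputs lie outside Pre_, so no speed is claimed.
-- outside the precondition, e.g. on get_post_order('aa', 'aa'): A returns 'aa', B raises IndexError; on get_post_order('a', 'ab'): A returns 'a', B returns 'a'
import Mathlib
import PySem

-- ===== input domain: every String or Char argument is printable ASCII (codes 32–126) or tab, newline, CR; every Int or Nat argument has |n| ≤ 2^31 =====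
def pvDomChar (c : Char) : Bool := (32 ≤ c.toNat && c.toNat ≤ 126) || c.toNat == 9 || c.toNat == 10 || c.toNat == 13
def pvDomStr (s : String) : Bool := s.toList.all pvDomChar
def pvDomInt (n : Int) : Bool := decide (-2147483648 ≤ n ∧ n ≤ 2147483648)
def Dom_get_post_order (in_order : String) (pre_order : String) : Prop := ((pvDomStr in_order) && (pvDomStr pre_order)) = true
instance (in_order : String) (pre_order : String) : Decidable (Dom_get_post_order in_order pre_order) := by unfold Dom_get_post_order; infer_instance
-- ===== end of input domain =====

-- B rebuilds the postorder from a char→index map and index-range recursion instead of A's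
-- per-call linear find plus string slicing and concatenation; equal on Pre_ (distinct-char
-- inorder/preorder pairs of one binary tree, plus the degenerate empty-in_order corner).

-- ===== PORT A =====
-- Python A recurses on string slices; ported on the code-point lists with PySem primitives.
-- The unbounded Python recursion is expressed with a fuel parameter: on inputs admitted by
-- Pre_ the recursion depth is below the initial fuel (length + 1), so the port is exact there
-- (outside Pre_ Python may raise/diverge; nothing is claimed there).
def getPostOrderGo (fuel : Nat) (inOrd preOrd : List Char) : List Char :=
  match fuel with
  | 0 => []
  | f + 1 =>
    match PySem.List.pyGet? preOrd 0 with       -- root = pre_order[0]  (none = IndexError)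
    | none => []
    | some root =>
      let rootIndex : Int := PySem.Chars.find inOrd [root]     -- in_order.find(root)
      let inOrderLeft := PySem.List.slice inOrd none (some rootIndex)
      let inOrderRight := PySem.List.slice inOrd (some (rootIndex + 1)) none
      let preOrderLeft := PySem.List.slice preOrd (some 1) (some (rootIndex + 1))
      let preOrderRight := PySem.List.slice preOrd (some (rootIndex + 1)) none
      let postOrderLeft := if inOrderLeft ≠ [] then getPostOrderGo f inOrderLeft preOrderLeft else []
      let postOrderRight := if inOrderRight ≠ [] then getPostOrderGo f inOrderRight preOrderRight else []
      postOrderLeft ++ postOrderRight ++ [root]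

def get_post_order (in_order : String) (pre_order : String) : String :=
  String.ofList (getPostOrderGo (in_order.toList.length + 1) in_order.toList pre_order.toList)

-- ===== PORT B =====
-- pos = {c: i for i, c in enumerate(in_order)}
def altPos (inOrd : List Char) : PySem.Dict Char Int :=
  (PySem.List.enumerate inOrd 0).foldl (fun d ic => d.insert ic.2 ic.1) PySem.Dict.empty

-- rec(lo, hi, plo) appending into out; same fuel device as in port A (exact on Pre_).
def altRec (preOrd : List Char) (pos : PySem.Dict Char Int) (fuel : Nat)
    (lo hi plo : Int) (out : List Char) : List Char :=
  match fuel with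
  | 0 => out
  | f + 1 =>
    match PySem.List.pyGet? preOrd plo with   -- root = pre_order[plo]  (none = IndexError)
    | none => out
    | some root =>
      let m := pos.getD root (-1)             -- m = pos.get(root, -1)
      let out1 := if lo < m then altRec preOrd pos f lo m (plo + 1) out else out
      let out2 := if m + 1 < hi then altRec preOrd pos f (m + 1) hi (plo + 1 + (m - lo)) out1 else out1
      out2 ++ [root]

-- out is kept as the list of code points; ''.join(out) is the final String.ofList.
def get_post_order_alt (in_order : String) (pre_order : String) : String :=
  String.ofList (altRec pre_order.toList (altPos in_order.toList) (in_order.toList.length + 1)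
    0 in_order.toList.length 0 [])

-- ===== PRECONDITION & SPEC =====
-- position in the in-order string of the j-th pre-order character
def pvSig (I P : List Char) (j : Nat) : Nat := List.idxOf (P.getD j ' ') I

-- no "231 pattern": the classic closed-form test that a permutation is a valid pre-order
def pvNo231 (I P : List Char) : Prop :=
  ∀ k, k < P.length → ∀ j, j < k → ∀ i, i < j →
    ¬ (pvSig I P k < pvSig I P i ∧ pvSig I P i < pvSig I P j)

-- Pre_: either the two strings are the in-order and pre-order listings of one binary tree
-- with distinct node labels (stated closed-form: nonempty, same length, distinct characters,
-- same character set, no 231 pattern in the pre-order's in-order positions), or in_order is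
-- empty while pre_order is not (both programs then return pre_order[0]). Excluded although A
-- still returns there: pairs with duplicate characters, where A's first-occurrence find makes
-- the result an accident of the implementation and B may even raise, and mismatched pairs
-- such as a longer pre_order whose unread tail A ignores; A raises or diverges on all other
-- inputs.
def Pre_get_post_order (in_order : String) (pre_order : String) : Prop :=
  (in_order.toList ≠ [] ∧
   in_order.toList.Nodup ∧ pre_order.toList.Nodup ∧
   pre_order.toList.length = in_order.toList.length ∧
   pre_order.toList.all (fun c => in_order.toList.contains c) = true ∧
   in_order.toList.all (fun c => pre_order.toList.contains c) = true ∧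
   pvNo231 in_order.toList pre_order.toList) ∨
  (in_order.toList = [] ∧ pre_order.toList ≠ [])

instance (in_order : String) (pre_order : String) : Decidable (Pre_get_post_order in_order pre_order) := by
  unfold Pre_get_post_order pvNo231; infer_instance

def pvWitness_get_post_order : String × String := ("ab", "ba")

def Spec_get_post_order (in_order : String) (pre_order : String) (out : String) : Prop := out = get_post_order_alt in_order pre_order
instance (in_order : String) (pre_order : String) (out : String) : Decidable (Spec_get_post_order in_order pre_order out) := by unfold Spec_get_post_order; infer_instance

-- ===== CLAIM (what is proved, stated in full; the proofs are below) =====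
def Claim_equal_get_post_order : Prop := ∀ (in_order : String) (pre_order : String), Dom_get_post_order in_order pre_order → Pre_get_post_order in_order pre_order → Spec_get_post_order in_order pre_order (get_post_order in_order pre_order)

-- ===== LEMMAS AND PROOFS =====

-- the bundled validity hypothesis the lemmas below carry around
def pvValid (I P : List Char) : Prop :=
  I.Nodup ∧ P.Nodup ∧ P.length = I.length ∧
  (∀ c ∈ P, c ∈ I) ∧ (∀ c ∈ I, c ∈ P) ∧ pvNo231 I P

lemma pre_to_valid {i p : String}
    (h : i.toList ≠ [] ∧ i.toList.Nodup ∧ p.toList.Nodup ∧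
         p.toList.length = i.toList.length ∧
         p.toList.all (fun c => i.toList.contains c) = true ∧
         i.toList.all (fun c => p.toList.contains c) = true ∧
         pvNo231 i.toList p.toList) :
    pvValid i.toList p.toList := by
  obtain ⟨-, h1, h2, h3, h4, h5, h6⟩ := h
  refine ⟨h1, h2, h3, ?_, ?_, h6⟩
  · intro c hc
    simpa using List.all_eq_true.mp h4 c hc
  · intro c hc
    simpa using List.all_eq_true.mp h5 c hc

lemma goA_nil (f : Nat) : getPostOrderGo f [] [] = [] := by
  cases f <;> simp [getPostOrderGo, PySem.List.pyGet?]

lemma idxOf_le_of_getElem {l : List Char} {c : Char} {j : Nat} (hj : j < l.length) (h : l[j] = c) :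
    List.idxOf c l ≤ j := by
  by_contra hlt
  push_neg at hlt
  simp only [List.idxOf, List.lt_findIdx_iff] at hlt
  obtain ⟨h1, hall⟩ := hlt
  have h2 := hall j le_rfl
  rw [h] at h2
  simp at h2

lemma find_singleton {l : List Char} {c : Char} (h : c ∈ l) :
    PySem.Chars.find l [c] = (List.idxOf c l : Int) := by
  have hnn : 0 ≤ PySem.Chars.find l [c] :=
    (PySem.Chars.find_nonneg_iff l [c]).mpr ((List.singleton_infix_iff c l).mpr h)
  obtain ⟨hpre, hmin⟩ := PySem.Chars.find_spec hnn
  have hlt : List.idxOf c l < l.length := List.idxOf_lt_length_iff.mpr h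
  have h1 : (PySem.Chars.find l [c]).toNat ≤ List.idxOf c l := by
    by_contra hgt
    push_neg at hgt
    refine hmin _ hgt ⟨l.drop (List.idxOf c l + 1), ?_⟩
    rw [List.drop_eq_getElem_cons hlt, List.getElem_idxOf hlt]
    rfl
  have hlen : (PySem.Chars.find l [c]).toNat < l.length := by
    by_contra hge
    push_neg at hge
    rw [List.drop_eq_nil_of_le hge] at hpre
    simpa using List.eq_nil_of_prefix_nil hpre
  have h2 : List.idxOf c l ≤ (PySem.Chars.find l [c]).toNat := by
    obtain ⟨t, ht⟩ := hpre
    rw [List.drop_eq_getElem_cons hlen] at ht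
    have hc : l[(PySem.Chars.find l [c]).toNat] = c := by
      have := congrArg (fun xs => xs.head?) ht
      simp only [List.head?_cons] at this
      exact (Option.some_injective _ this).symm
    exact idxOf_le_of_getElem hlen hc
  omega

lemma idxOf_take_eq {l : List Char} {c : Char} {r : Nat} (h : c ∈ l.take r) :
    List.idxOf c (l.take r) = List.idxOf c l := by
  conv_rhs => rw [← List.take_append_drop r l]
  rw [List.idxOf_append, if_pos h]

lemma idxOf_drop_eq {l : List Char} (hN : l.Nodup) {c : Char} {r : Nat} (h : c ∈ l.drop r) :
    List.idxOf c (l.drop r) + r = List.idxOf c l := by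
  have hr : r ≤ l.length := by
    by_contra hgt
    push_neg at hgt
    rw [List.drop_eq_nil_of_le hgt.le] at h
    simp at h
  have hnotin : c ∉ l.take r := by
    intro hin
    have hN2 := hN
    rw [← List.take_append_drop r l] at hN2
    exact ((List.nodup_append.mp hN2).2.2 c hin c h) rfl
  conv_rhs => rw [← List.take_append_drop r l]
  rw [List.idxOf_append, if_neg hnotin, List.length_take, Nat.min_eq_left hr]

lemma mem_take_iff' {l : List Char} {c : Char} {r : Nat} :
    c ∈ l.take r ↔ c ∈ l ∧ List.idxOf c l < r := by
  constructor
  · intro h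
    refine ⟨List.mem_of_mem_take h, ?_⟩
    rw [← idxOf_take_eq h]
    calc List.idxOf c (l.take r) < (l.take r).length := List.idxOf_lt_length_iff.mpr h
      _ ≤ r := by simp
  · rintro ⟨hm, hlt⟩
    have hil : List.idxOf c l < l.length := List.idxOf_lt_length_iff.mpr hm
    have : (l.take r)[List.idxOf c l]'(by simp; omega) = c := by
      rw [List.getElem_take, List.getElem_idxOf hil]
    exact this ▸ List.getElem_mem _

lemma mem_drop_iff' {l : List Char} (hN : l.Nodup) {c : Char} {r : Nat} :
    c ∈ l.drop r ↔ c ∈ l ∧ r ≤ List.idxOf c l := by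
  constructor
  · intro h
    have := idxOf_drop_eq hN h
    exact ⟨List.mem_of_mem_drop h, by omega⟩
  · rintro ⟨hm, hle⟩
    have hil : List.idxOf c l < l.length := List.idxOf_lt_length_iff.mpr hm
    have : (l.drop r)[List.idxOf c l - r]'(by simp; omega) = c := by
      rw [List.getElem_drop]
      have : r + (List.idxOf c l - r) = List.idxOf c l := by omega
      simp only [this]
      exact List.getElem_idxOf hil
    exact this ▸ List.getElem_mem _

lemma altPos_append (xs : List Char) (x : Char) :
    altPos (xs ++ [x]) = (altPos xs).insert x (xs.length : Int) := by
  unfold altPos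
  rw [PySem.List.enumerate_append, List.foldl_append]
  simp [PySem.List.enumerate]

lemma pos_get? {I : List Char} (hN : I.Nodup) {c : Char} (h : c ∈ I) :
    (altPos I).get? c = some (List.idxOf c I : Int) := by
  induction I using List.reverseRecOn with
  | nil => simp at h
  | append_singleton xs x IH =>
    rw [altPos_append]
    rw [List.nodup_append] at hN
    by_cases hc : c = x
    · subst hc
      rw [PySem.Dict.get?_insert_self]
      have hnot : c ∉ xs := fun hin => (hN.2.2 c hin c (by simp)) rfl
      rw [List.idxOf_append, if_neg hnot]
      simp
    · rw [PySem.Dict.get?_insert_of_ne _ _ hc]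
      have hin : c ∈ xs := by
        rcases List.mem_append.mp h with h1 | h1
        · exact h1
        · simp at h1; exact absurd h1 hc
      rw [IH hN.1 hin, List.idxOf_append, if_pos hin]

-- ---- facts about pvSig under pvValid ----

lemma sig_getElem {I P : List Char} {j : Nat} (hj : j < P.length) :
    pvSig I P j = List.idxOf P[j] I := by
  rw [pvSig, List.getD_eq_getElem _ _ hj]

lemma sig_lt_len {I P : List Char} (hV : pvValid I P) {j : Nat} (hj : j < P.length) :
    pvSig I P j < I.length := by
  rw [sig_getElem hj]
  exact List.idxOf_lt_length_iff.mpr (hV.2.2.2.1 _ (List.getElem_mem hj))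

lemma sig_inj {I P : List Char} (hV : pvValid I P) {i j : Nat}
    (hi : i < P.length) (hj : j < P.length) (h : pvSig I P i = pvSig I P j) : i = j := by
  rw [sig_getElem hi, sig_getElem hj] at h
  have h1 : List.idxOf P[i] I < I.length :=
    List.idxOf_lt_length_iff.mpr (hV.2.2.2.1 _ (List.getElem_mem hi))
  have h2 : P[i] = P[j] := by
    have e1 := List.getElem_idxOf h1
    have e2 := List.getElem_idxOf (h ▸ h1)
    simp only [h] at e1
    exact e1.symm.trans e2
  exact (List.Nodup.getElem_inj_iff hV.2.1).mp h2

lemma sig_surj {I P : List Char} (hV : pvValid I P) {v : Nat} (hv : v < I.length) :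
    ∃ j, j < P.length ∧ pvSig I P j = v := by
  obtain ⟨j, hj, hje⟩ := List.mem_iff_getElem.mp (hV.2.2.2.2.1 _ (List.getElem_mem hv))
  exact ⟨j, hj, by rw [sig_getElem hj, hje, List.Nodup.idxOf_getElem hV.1 v hv]⟩

lemma sig_card {I P : List Char} (hV : pvValid I P) (h0 : 0 < P.length) :
    ((Finset.Ico 1 P.length).filter (fun j => pvSig I P j < pvSig I P 0)).card = pvSig I P 0 := by
  set r := pvSig I P 0 with hr
  have hrI : r < I.length := sig_lt_len hV h0
  suffices hcr : ((Finset.Ico 1 P.length).filter (fun j => pvSig I P j < r)).card = (Finset.range r).card by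
    rw [hcr, Finset.card_range]
  refine Finset.card_bij (fun j _ => pvSig I P j) ?_ ?_ ?_
  · intro j hj
    rw [Finset.mem_filter] at hj
    exact Finset.mem_range.mpr hj.2
  · intro a ha b hb hab
    rw [Finset.mem_filter, Finset.mem_Ico] at ha hb
    exact sig_inj hV ha.1.2 hb.1.2 hab
  · intro v hv
    rw [Finset.mem_range] at hv
    obtain ⟨j, hjP, hje⟩ := sig_surj hV (by omega : v < I.length)
    have hj0 : j ≠ 0 := by
      intro he
      rw [he] at hje
      omega
    exact ⟨j, Finset.mem_filter.mpr ⟨Finset.mem_Ico.mpr ⟨by omega, hjP⟩, by omega⟩, hje⟩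

lemma split_b {I P : List Char} (hV : pvValid I P) (h0 : 0 < P.length)
    {j : Nat} (h1 : 1 ≤ j) (h2 : j ≤ pvSig I P 0) : pvSig I P j < pvSig I P 0 := by
  set r := pvSig I P 0 with hr
  have hrI : r < I.length := sig_lt_len hV h0
  have hlen : P.length = I.length := hV.2.2.1
  have hjP : j < P.length := by omega
  by_contra hge
  push_neg at hge
  have hne : pvSig I P j ≠ r := fun he => by
    have := sig_inj hV hjP h0 (hr ▸ he)
    omega
  have hgt : r < pvSig I P j := by omega
  set A := (Finset.Ico 1 P.length).filter (fun k => pvSig I P k < r) with hA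
  have hsub : A ⊆ (Finset.Ico 1 (r + 1)).erase j := by
    intro k hk
    rw [hA, Finset.mem_filter, Finset.mem_Ico] at hk
    have hkr : k ≤ r := by
      by_contra hkgt
      push_neg at hkgt
      have hjk : j < k := by omega
      exact hV.2.2.2.2.2 k hk.1.2 j hjk 0 h1 ⟨hk.2, hgt⟩
    refine Finset.mem_erase.mpr ⟨fun he => by rw [he] at hk; omega, Finset.mem_Ico.mpr ⟨hk.1.1, by omega⟩⟩
  have hcard := Finset.card_le_card hsub
  rw [sig_card hV h0] at hcard
  rw [Finset.card_erase_of_mem (Finset.mem_Ico.mpr ⟨h1, by omega⟩), Nat.card_Ico] at hcard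
  omega

lemma split_c {I P : List Char} (hV : pvValid I P) (h0 : 0 < P.length)
    {k : Nat} (h1 : pvSig I P 0 < k) (h2 : k < P.length) : pvSig I P 0 < pvSig I P k := by
  set r := pvSig I P 0 with hr
  have hne : pvSig I P k ≠ r := fun he => by
    have := sig_inj hV h2 h0 (hr ▸ he)
    omega
  by_contra hge
  push_neg at hge
  have hklt : pvSig I P k < r := by omega
  set A := (Finset.Ico 1 P.length).filter (fun j => pvSig I P j < r) with hA
  have hsub : Finset.Ico 1 (r + 1) ⊆ A := by
    intro j hj
    rw [Finset.mem_Ico] at hj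
    refine Finset.mem_filter.mpr ⟨Finset.mem_Ico.mpr ⟨hj.1, by omega⟩, ?_⟩
    exact split_b hV h0 hj.1 (by omega)
  have heq : Finset.Ico 1 (r + 1) = A := by
    apply Finset.eq_of_subset_of_card_le hsub
    rw [sig_card hV h0, Nat.card_Ico]
    omega
  have hkA : k ∈ A := Finset.mem_filter.mpr ⟨Finset.mem_Ico.mpr ⟨by omega, h2⟩, hklt⟩
  rw [← heq, Finset.mem_Ico] at hkA
  omega

-- ---- the split lemma: both sub-pairs are valid ----

lemma split_valid_left {I P : List Char} (hV : pvValid I P) (h0 : 0 < P.length) :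
    pvValid (I.take (pvSig I P 0)) ((P.drop 1).take (pvSig I P 0)) := by
  obtain ⟨hNI, hNP, hlen, hPI, hIP, h231⟩ := hV
  set r := pvSig I P 0 with hr
  have hrI : r < I.length := sig_lt_len ⟨hNI, hNP, hlen, hPI, hIP, h231⟩ h0
  have hrP : r < P.length := by omega
  have hIL : (I.take r).length = r := by simp; omega
  have hPL : ((P.drop 1).take r).length = r := by simp; omega
  have hPLget : ∀ x (hx : x < r), ((P.drop 1).take r)[x]'(by omega) = P[x + 1]'(by omega) := by
    intro x hx
    rw [List.getElem_take, List.getElem_drop]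
    have h1 : 1 + x = x + 1 := by omega
    simp only [h1]
  have hsigb : ∀ x (hx : x < r), pvSig I P (x + 1) < r ∧ (P[x + 1]'(by omega)) ∈ I.take r := by
    intro x hx
    have hlt : pvSig I P (x + 1) < r :=
      split_b ⟨hNI, hNP, hlen, hPI, hIP, h231⟩ h0 (by omega) (by omega)
    have hm : (P[x + 1]'(by omega)) ∈ I := hPI _ (List.getElem_mem (by omega))
    refine ⟨hlt, mem_take_iff'.mpr ⟨hm, ?_⟩⟩
    rw [← sig_getElem (by omega : x + 1 < P.length)]
    exact hlt
  have hsig : ∀ x, x < r → pvSig (I.take r) ((P.drop 1).take r) x = pvSig I P (x + 1) := by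
    intro x hx
    rw [sig_getElem (by omega : x < ((P.drop 1).take r).length), hPLget x hx,
        idxOf_take_eq (hsigb x hx).2, ← sig_getElem (by omega : x + 1 < P.length)]
  refine ⟨(List.take_sublist _ _).nodup hNI,
          ((List.take_sublist _ _).trans (List.drop_sublist _ _)).nodup hNP,
          by omega, ?_, ?_, ?_⟩
  · intro c hc
    obtain ⟨x, hx, hxe⟩ := List.mem_iff_getElem.mp hc
    rw [hPLget x (by omega)] at hxe
    exact hxe ▸ (hsigb x (by omega)).2
  · intro c hc
    obtain ⟨hcI, hidx⟩ := mem_take_iff'.mp hc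
    obtain ⟨k, hk, hke⟩ := List.mem_iff_getElem.mp (hIP c hcI)
    have hsk : pvSig I P k = List.idxOf c I := by rw [sig_getElem hk, hke]
    have hk0 : k ≠ 0 := by
      intro he
      rw [he] at hsk
      omega
    have hkr : k ≤ r := by
      by_contra hgt
      push_neg at hgt
      have := split_c ⟨hNI, hNP, hlen, hPI, hIP, h231⟩ h0 hgt hk
      omega
    refine List.mem_iff_getElem.mpr ⟨k - 1, by omega, ?_⟩
    rw [hPLget (k - 1) (by omega)]
    have h1 : k - 1 + 1 = k := by omega
    simp only [h1]
    exact hke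
  · intro k hk j hj i hi hcon
    rw [hPL] at hk
    rw [hsig k hk, hsig j (by omega), hsig i (by omega)] at hcon
    exact h231 (k + 1) (by omega) (j + 1) (by omega) (i + 1) (by omega) hcon

lemma split_valid_right {I P : List Char} (hV : pvValid I P) (h0 : 0 < P.length) :
    pvValid (I.drop (pvSig I P 0 + 1)) (P.drop (pvSig I P 0 + 1)) := by
  obtain ⟨hNI, hNP, hlen, hPI, hIP, h231⟩ := hV
  set r := pvSig I P 0 with hr
  have hrI : r < I.length := sig_lt_len ⟨hNI, hNP, hlen, hPI, hIP, h231⟩ h0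
  have hrP : r < P.length := by omega
  have hIR : (I.drop (r + 1)).length = I.length - (r + 1) := by simp
  have hPR : (P.drop (r + 1)).length = P.length - (r + 1) := by simp
  have hPRget : ∀ x (hx : x < P.length - (r + 1)), (P.drop (r + 1))[x]'(by omega) = P[r + 1 + x]'(by omega) := by
    intro x hx
    rw [List.getElem_drop]
  have hsigc : ∀ x (hx : x < P.length - (r + 1)),
      r < pvSig I P (r + 1 + x) ∧ (P[r + 1 + x]'(by omega)) ∈ I.drop (r + 1) := by
    intro x hx
    have hgt : r < pvSig I P (r + 1 + x) :=
      split_c ⟨hNI, hNP, hlen, hPI, hIP, h231⟩ h0 (by omega) (by omega)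
    have hm : (P[r + 1 + x]'(by omega)) ∈ I := hPI _ (List.getElem_mem (by omega))
    refine ⟨hgt, (mem_drop_iff' hNI).mpr ⟨hm, ?_⟩⟩
    rw [← sig_getElem (by omega : r + 1 + x < P.length)]
    omega
  have hsig : ∀ x, x < P.length - (r + 1) →
      pvSig (I.drop (r + 1)) (P.drop (r + 1)) x + (r + 1) = pvSig I P (r + 1 + x) := by
    intro x hx
    rw [sig_getElem (by omega : x < (P.drop (r + 1)).length), hPRget x hx,
        sig_getElem (by omega : r + 1 + x < P.length)]
    exact idxOf_drop_eq hNI (hsigc x hx).2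
  refine ⟨(List.drop_sublist _ _).nodup hNI, (List.drop_sublist _ _).nodup hNP,
          by omega, ?_, ?_, ?_⟩
  · intro c hc
    obtain ⟨x, hx, hxe⟩ := List.mem_iff_getElem.mp hc
    rw [hPRget x (by omega)] at hxe
    exact hxe ▸ (hsigc x (by omega)).2
  · intro c hc
    obtain ⟨hcI, hidx⟩ := (mem_drop_iff' hNI).mp hc
    obtain ⟨k, hk, hke⟩ := List.mem_iff_getElem.mp (hIP c hcI)
    have hsk : pvSig I P k = List.idxOf c I := by rw [sig_getElem hk, hke]
    have hidxlt : List.idxOf c I < I.length := List.idxOf_lt_length_iff.mpr hcI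
    have hk0 : k ≠ 0 := by
      intro he
      rw [he] at hsk
      omega
    have hkr : r < k := by
      by_contra hle
      push_neg at hle
      have := split_b ⟨hNI, hNP, hlen, hPI, hIP, h231⟩ h0 (by omega) hle
      omega
    refine List.mem_iff_getElem.mpr ⟨k - (r + 1), by omega, ?_⟩
    rw [hPRget (k - (r + 1)) (by omega)]
    have h1 : r + 1 + (k - (r + 1)) = k := by omega
    simp only [h1]
    exact hke
  · intro k hk j hj i hi hcon
    rw [hPR] at hk
    have ek := hsig k hk
    have ej := hsig j (by omega)
    have ei := hsig i (by omega)
    refine h231 (r + 1 + k) (by omega) (r + 1 + j) (by omega) (r + 1 + i) (by omega) ?_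
    omega

lemma main_equiv (I P : List Char) (hN : I.Nodup) :
    ∀ s lo plo fuel1 fuel2 : Nat, ∀ out : List Char,
    1 ≤ s → lo + s ≤ I.length → plo + s ≤ P.length →
    pvValid ((I.drop lo).take s) ((P.drop plo).take s) →
    s ≤ fuel1 → s ≤ fuel2 →
    altRec P (altPos I) fuel2 (lo : Int) ((lo + s : Nat) : Int) (plo : Int) out
      = out ++ getPostOrderGo fuel1 ((I.drop lo).take s) ((P.drop plo).take s) := by
  intro s
  induction s using Nat.strong_induction_on with
  | _ s IH =>
    intro lo plo fuel1 fuel2 out hs1 hIlen hPlen hVseg hf1 hf2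
    obtain _ | s' := s
    · omega
    · obtain ⟨f1, rfl⟩ : ∃ f1, fuel1 = f1 + 1 := ⟨fuel1 - 1, by omega⟩
      obtain ⟨f2, rfl⟩ : ∃ f2, fuel2 = f2 + 1 := ⟨fuel2 - 1, by omega⟩
      have hI'len : ((I.drop lo).take (s' + 1)).length = s' + 1 := by simp; omega
      have hP'len : ((P.drop plo).take (s' + 1)).length = s' + 1 := by simp; omega
      have hplo : plo < P.length := by omega
      have h0' : 0 < ((P.drop plo).take (s' + 1)).length := by omega
      have hroot0 : ((P.drop plo).take (s' + 1))[0]'h0' = P[plo]'hplo := by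
        rw [List.getElem_take, List.getElem_drop]
        simp
      set root := P[plo]'hplo with hrootdef
      set r := pvSig ((I.drop lo).take (s' + 1)) ((P.drop plo).take (s' + 1)) 0 with hrdef
      have hrs : r < s' + 1 := by
        have := sig_lt_len hVseg h0'
        omega
      have hrootI' : root ∈ (I.drop lo).take (s' + 1) := by
        have hm : ((P.drop plo).take (s' + 1))[0]'h0' ∈ (P.drop plo).take (s' + 1) :=
          List.getElem_mem h0'
        rw [hroot0] at hm
        exact hVseg.2.2.2.1 _ hm
      have hrootdrop : root ∈ I.drop lo := List.mem_of_mem_take hrootI'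
      have hrootI : root ∈ I := List.mem_of_mem_drop hrootdrop
      have hsig0 : List.idxOf root ((I.drop lo).take (s' + 1)) = r := by
        rw [hrdef, sig_getElem h0', hroot0]
      have hgidx : List.idxOf root I = lo + r := by
        have h1 := idxOf_drop_eq hN hrootdrop
        have h2 : List.idxOf root ((I.drop lo).take (s' + 1)) = List.idxOf root (I.drop lo) :=
          idxOf_take_eq hrootI'
        omega
      -- segment identities
      have eIL : ((I.drop lo).take (s' + 1)).take r = (I.drop lo).take r := by
        rw [List.take_take, Nat.min_eq_left (by omega)]
      have ePL : (((P.drop plo).take (s' + 1)).drop 1).take r = (P.drop (plo + 1)).take r := by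
        rw [List.drop_take, List.drop_drop]
        have h2 : s' + 1 - 1 = s' := by omega
        rw [h2, List.take_take, Nat.min_eq_left (by omega)]
      have eIR : ((I.drop lo).take (s' + 1)).drop (r + 1) = (I.drop (lo + r + 1)).take (s' - r) := by
        rw [List.drop_take, List.drop_drop]
        have h1 : lo + (r + 1) = lo + r + 1 := by omega
        have h2 : s' + 1 - (r + 1) = s' - r := by omega
        rw [h1, h2]
      have ePR : ((P.drop plo).take (s' + 1)).drop (r + 1) = (P.drop (plo + 1 + r)).take (s' - r) := by
        rw [List.drop_take, List.drop_drop]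
        have h1 : plo + (r + 1) = plo + 1 + r := by omega
        have h2 : s' + 1 - (r + 1) = s' - r := by omega
        rw [h1, h2]
      -- validity of the two sub-segments
      have hVL : pvValid ((I.drop lo).take r) ((P.drop (plo + 1)).take r) := by
        have := split_valid_left hVseg h0'
        rw [← hrdef, eIL, ePL] at this
        exact this
      have hVR : pvValid ((I.drop (lo + r + 1)).take (s' - r)) ((P.drop (plo + 1 + r)).take (s' - r)) := by
        have := split_valid_right hVseg h0'
        rw [← hrdef, eIR, ePR] at this
        exact this
      -- B side: unfold one step
      rw [altRec]
      rw [PySem.List.pyGet?_natCast, List.getElem?_eq_getElem hplo]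
      dsimp only
      have hgetD : (altPos I).getD root (-1) = ((lo + r : Nat) : Int) := by
        simp [PySem.Dict.getD, pos_get? hN hrootI, hgidx]
      rw [hgetD]
      -- normalise the Int arguments of the recursive calls
      have e0 : ((plo : Int) + 1) = ((plo + 1 : Nat) : Int) := by push_cast; ring
      have e1 : (((lo + r : Nat) : Int) + 1) = ((lo + r + 1 : Nat) : Int) := by push_cast; ring
      have e2 : (((plo + 1 : Nat) : Int) + (((lo + r : Nat) : Int) - (lo : Int))) = ((plo + 1 + r : Nat) : Int) := by
        push_cast; ring
      have e3 : lo + (s' + 1) = (lo + r + 1) + (s' - r) := by omega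
      rw [e0, e1, e2, e3]
      -- the two guarded recursive calls, by the induction hypothesis
      have hL : (if (lo : Int) < ((lo + r : Nat) : Int) then
            altRec P (altPos I) f2 (lo : Int) ((lo + r : Nat) : Int) ((plo + 1 : Nat) : Int) out else out)
          = out ++ getPostOrderGo f1 ((I.drop lo).take r) ((P.drop (plo + 1)).take r) := by
        by_cases hr0 : r = 0
        · rw [if_neg (by push_cast; omega), hr0]
          simp [goA_nil]
        · rw [if_pos (by push_cast; omega)]
          exact IH r (by omega) lo (plo + 1) f1 f2 out (by omega) (by omega) (by omega) hVL
            (by omega) (by omega)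
      rw [hL]
      have hR : (if ((lo + r + 1 : Nat) : Int) < ((lo + r + 1 + (s' - r) : Nat) : Int) then
            altRec P (altPos I) f2 ((lo + r + 1 : Nat) : Int) ((lo + r + 1 + (s' - r) : Nat) : Int)
              ((plo + 1 + r : Nat) : Int)
              (out ++ getPostOrderGo f1 ((I.drop lo).take r) ((P.drop (plo + 1)).take r))
          else out ++ getPostOrderGo f1 ((I.drop lo).take r) ((P.drop (plo + 1)).take r))
          = (out ++ getPostOrderGo f1 ((I.drop lo).take r) ((P.drop (plo + 1)).take r))
            ++ getPostOrderGo f1 ((I.drop (lo + r + 1)).take (s' - r)) ((P.drop (plo + 1 + r)).take (s' - r)) := by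
        by_cases hs0 : s' - r = 0
        · rw [if_neg (by push_cast; omega), hs0]
          simp [goA_nil]
        · rw [if_pos (by push_cast; omega)]
          exact IH (s' - r) (by omega) (lo + r + 1) (plo + 1 + r) f1 f2
            (out ++ getPostOrderGo f1 ((I.drop lo).take r) ((P.drop (plo + 1)).take r))
            (by omega) (by omega) (by omega) hVR (by omega) (by omega)
      rw [hR]
      -- A side: unfold one step
      rw [getPostOrderGo]
      rw [PySem.List.pyGet?_zero, List.getElem?_eq_getElem h0', hroot0]
      dsimp only
      rw [find_singleton hrootI', hsig0]
      have es1 : ((r : Int) + 1) = ((r + 1 : Nat) : Int) := by push_cast; ring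
      have es2 : (1 : Int) = ((1 : Nat) : Int) := by norm_num
      rw [PySem.List.slice_to_natCast, es1, PySem.List.slice_from_natCast,
          es2, PySem.List.slice_natCast, PySem.List.slice_from_natCast]
      have h11 : r + 1 - 1 = r := by omega
      rw [h11]
      rw [eIL, ePL, eIR, ePR]
      -- resolve the two guards against the branch values
      have hXif : (if List.take r (List.drop lo I) ≠ [] then getPostOrderGo f1 (List.take r (List.drop lo I)) (List.take r (List.drop (plo + 1) P)) else [])
          = getPostOrderGo f1 (List.take r (List.drop lo I)) (List.take r (List.drop (plo + 1) P)) := by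
        by_cases hr0 : r = 0
        · rw [if_neg (by rw [hr0]; simp), hr0]
          simp [goA_nil]
        · rw [if_pos (by
            intro he
            have hlc := congrArg List.length he
            simp at hlc
            omega)]
      have hYif : (if List.take (s' - r) (List.drop (lo + r + 1) I) ≠ [] then getPostOrderGo f1 (List.take (s' - r) (List.drop (lo + r + 1) I)) (List.take (s' - r) (List.drop (plo + 1 + r) P)) else [])
          = getPostOrderGo f1 (List.take (s' - r) (List.drop (lo + r + 1) I)) (List.take (s' - r) (List.drop (plo + 1 + r) P)) := by
        by_cases hs0 : s' - r = 0
        · rw [if_neg (by rw [hs0]; simp), hs0]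
          simp [goA_nil]
        · rw [if_pos (by
            intro he
            have hlc := congrArg List.length he
            simp at hlc
            omega)]
      rw [hXif, hYif]
      simp [List.append_assoc]
      rw [hrootdef]

-- ===== VERDICT (by name: the statement is the Claim_ definition above) =====
theorem get_post_order_spec : Claim_equal_get_post_order := by
  intro in_order pre_order _hD hPre
  unfold Spec_get_post_order
  rcases hPre with hPre | ⟨hI, hP⟩
  · have hne := hPre.1
    have hV := pre_to_valid hPre
    have hpos : 0 < in_order.toList.length := List.length_pos_iff.mpr hne
    have hlen : pre_order.toList.length = in_order.toList.length := hV.2.2.1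
    have hIfull : List.take in_order.toList.length (List.drop 0 in_order.toList) = in_order.toList := by
      simp
    have hPfull : List.take in_order.toList.length (List.drop 0 pre_order.toList) = pre_order.toList := by
      rw [List.drop_zero]
      exact List.take_of_length_le hlen.le
    have h := main_equiv in_order.toList pre_order.toList hV.1
      in_order.toList.length 0 0 (in_order.toList.length + 1) (in_order.toList.length + 1) []
      (by omega) (by omega) (by omega) (by rw [hIfull, hPfull]; exact hV) (by omega) (by omega)
    rw [hIfull, hPfull] at h
    simp only [Nat.zero_add, Nat.cast_zero, List.nil_append] at h
    unfold get_post_order get_post_order_alt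
    rw [h]
  · obtain ⟨c, cs, hcs⟩ : ∃ c cs, pre_order.toList = c :: cs := by
      cases hp : pre_order.toList with
      | nil => exact absurd hp hP
      | cons c cs => exact ⟨c, cs, rfl⟩
    have hA : get_post_order in_order pre_order = String.ofList [c] := by
      unfold get_post_order
      rw [hI, hcs]
      have hfind : PySem.Chars.find ([] : List Char) [c] = -1 := by
        rw [PySem.Chars.find_eq_neg_one_iff]
        intro hinf
        simpa using List.eq_nil_of_infix_nil hinf
      simp [getPostOrderGo, PySem.List.pyGet?, PySem.List.pyIdx?, hfind, PySem.List.slice]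
    have hB : get_post_order_alt in_order pre_order = String.ofList [c] := by
      unfold get_post_order_alt
      rw [hI, hcs]
      have hempty : altPos ([] : List Char) = PySem.Dict.empty := by
        simp [altPos, PySem.List.enumerate]
      simp [altRec, PySem.List.pyGet?, PySem.List.pyIdx?, hempty,
            PySem.Dict.getD, PySem.Dict.get?, PySem.Dict.empty]
    rw [hA, hB]
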